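-- pv_equiv track=rewrite | github.com/carlegbert/advent-of-code | aoc24/solutions/p10.py | score_trailhead
-- ===== SOURCE A (Python) =====
-- from typing import Iterable
--
-- Point = tuple[int, int]
--
-- Grid = dict[Point, int]
--
-- def adjacent_points(p: Point, g: Grid) -> Iterable[Point]:
--     x, y = p
--     for vx, vy in [(1, 0), (0, 1), (-1, 0), (0, -1)]:
--         a = vx + x, vy + y
--         if a in g:
--             yield a
--
-- def score_trailhead(t: Point, g: Grid) -> int:
--     visited: set[Point] = set()
--     to_visit: set[Point] = set([t])
--     result = 0
--
--     while to_visit: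
--         p = to_visit.pop()
--         visited.add(p)
--
--         elevation = g[p]
--         for a in adjacent_points(p, g):
--             if a in visited:
--                 continue
--
--             if g[a] - elevation != 1:
--                 continue
--
--             to_visit.add(a)
--
--         if g[p] == 9:
--             result += 1
--
--     return result
-- ===== SOURCE B (Python) =====
-- Point = tuple[int, int]
-- Grid = dict[Point, int]
--
--
-- def score_trailhead(t: Point, g: Grid) -> int:
--     def dfs(p: Point, visited: set[Point]) -> int:
--         if p in visited:
--             return 0
--         visited.add(p)
--         e = g[p]
--         cnt = 1 if e == 9 else 0
--         for vx, vy in [(1, 0), (0, 1), (-1, 0), (0, -1)]: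
--             a = (vx + p[0], vy + p[1])
--             if a in g and g[a] - e == 1:
--                 cnt += dfs(a, visited)
--         return cnt
--
--     return dfs(t, set())
-- ===== Notes on version B (the rewrite author's own statement) =====
-- stated objective: alternative
-- what changed: Replaces A's iterative worklist flood fill (explicit to_visit frontier set, popping in arbitrary order, counting 9-cells as they are popped) by a recursive depth-first search with a shared visited set that returns the count of newly visited height-9 cells directly from the recursion.
import Mathlib
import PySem

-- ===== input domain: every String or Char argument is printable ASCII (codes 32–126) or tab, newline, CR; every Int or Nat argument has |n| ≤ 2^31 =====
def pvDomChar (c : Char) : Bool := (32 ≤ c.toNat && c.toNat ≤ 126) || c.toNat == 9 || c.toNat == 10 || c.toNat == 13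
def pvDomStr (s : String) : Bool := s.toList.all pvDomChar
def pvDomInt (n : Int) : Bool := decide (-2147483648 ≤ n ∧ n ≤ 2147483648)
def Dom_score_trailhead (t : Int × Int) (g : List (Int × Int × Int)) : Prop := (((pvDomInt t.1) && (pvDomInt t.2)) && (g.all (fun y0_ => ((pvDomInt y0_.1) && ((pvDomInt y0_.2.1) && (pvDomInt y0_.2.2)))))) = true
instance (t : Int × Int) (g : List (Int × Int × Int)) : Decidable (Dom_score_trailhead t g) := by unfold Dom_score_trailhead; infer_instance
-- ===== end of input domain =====

-- B replaces A's iterative worklist flood fill by a recursive DFS with a shared visited set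
-- (objective: alternative, same cost); both raise KeyError iff t is not a key of g (excluded by Pre_).

-- shared helpers (the Python dict g becomes an association list of (x, y, value); lookup = first match)
-- pvKeyMem g p  =  'p in g'
def pvKeyMem (g : List (Int × Int × Int)) (p : Int × Int) : Bool :=
  g.any (fun e => e.1 == p.1 && e.2.1 == p.2)

-- pvGet g p  =  g[p]; total form: every use below is guarded by pvKeyMem (= Python's 'in g'),
-- except the very first lookup g[t], whose KeyError case is exactly what Pre_ excludes.
def pvGet (g : List (Int × Int × Int)) (p : Int × Int) : Int :=
  ((g.find? (fun e => e.1 == p.1 && e.2.1 == p.2)).map (fun e => e.2.2)).getD 0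

def pvDeltas : List (Int × Int) := [(1, 0), (0, 1), (-1, 0), (0, -1)]

-- ===== PORT A =====
-- generator adjacent_points(p, g): the in-grid neighbours of p, in delta order
def adjacent_points (p : Int × Int) (g : List (Int × Int × Int)) : List (Int × Int) :=
  pvDeltas.filterMap (fun d =>
    let a := (d.1 + p.1, d.2 + p.2)
    if pvKeyMem g a then some a else none)

-- the while loop; 'to_visit.pop()' takes an arbitrary element of a Python set (hash order, not
-- modelled): ported as taking the head of the Set's list — the proof below shows the returned
-- count equals B's for this order, and the count never depends on the pop order.
-- fuel = g.length + 1 is a pure totality guard: each iteration moves a fresh grid key into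
-- visited, so it is never exhausted (the proof discharges it).
def aLoop (g : List (Int × Int × Int)) : Nat → PySem.Set (Int × Int) → PySem.Set (Int × Int) → Int → Int
  | 0, _, _, res => res
  | _ + 1, _, [], res => res
  | fuel + 1, visited, p :: rest, res =>
    let visited' := PySem.Set.add visited p
    let elevation := pvGet g p
    let toVisit' := (adjacent_points p g).foldl (fun tv a =>
        if PySem.Set.contains visited' a then tv
        else if pvGet g a - elevation ≠ 1 then tv
        else PySem.Set.add tv a) rest
    let res' := if pvGet g p = 9 then res + 1 else res
    aLoop g fuel visited' toVisit' res'

def score_trailhead (t : Int × Int) (g : List (Int × Int × Int)) : Int :=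
  aLoop g (g.length + 1) PySem.Set.empty (PySem.Set.add PySem.Set.empty t) 0

-- ===== PORT B =====
-- recursive DFS with a shared visited set, returning (count of newly visited 9-cells, visited).
-- fuel = g.length + 1 is a totality guard only: recursion depth is bounded by the number of
-- distinct unvisited grid keys (the proof discharges it).
def dfsB (g : List (Int × Int × Int)) : Nat → (Int × Int) → PySem.Set (Int × Int) → Int × PySem.Set (Int × Int)
  | 0, _, visited => (0, visited)
  | fuel + 1, p, visited =>
    if PySem.Set.contains visited p then (0, visited)
    else
      let visited' := PySem.Set.add visited p
      let e := pvGet g p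
      let cnt : Int := if e = 9 then 1 else 0
      pvDeltas.foldl (fun acc d =>
        let a := (d.1 + p.1, d.2 + p.2)
        if pvKeyMem g a = true ∧ pvGet g a - e = 1 then
          let r := dfsB g fuel a acc.2
          (acc.1 + r.1, r.2)
        else acc) (cnt, visited')

def score_trailhead_alt (t : Int × Int) (g : List (Int × Int × Int)) : Int :=
  (dfsB g (g.length + 1) t PySem.Set.empty).1

-- ===== PRECONDITION & SPEC =====
-- Pre_ excludes exactly the inputs where Python A raises KeyError on 'g[t]' (t not a key of g);
-- Python B raises the same KeyError there.
def Pre_score_trailhead (t : Int × Int) (g : List (Int × Int × Int)) : Prop :=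
  pvKeyMem g t = true
instance (t : Int × Int) (g : List (Int × Int × Int)) : Decidable (Pre_score_trailhead t g) := by
  unfold Pre_score_trailhead; infer_instance

def pvWitness_score_trailhead : (Int × Int) × (List (Int × Int × Int)) := ((0, 0), [(0, 0, 9)])

def Spec_score_trailhead (t : Int × Int) (g : List (Int × Int × Int)) (out : Int) : Prop := out = score_trailhead_alt t g
instance (t : Int × Int) (g : List (Int × Int × Int)) (out : Int) : Decidable (Spec_score_trailhead t g out) := by unfold Spec_score_trailhead; infer_instance

-- ===== CLAIM (what is proved, stated in full; the proofs are below) =====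
def Claim_equal_score_trailhead : Prop := ∀ (t : Int × Int) (g : List (Int × Int × Int)), Dom_score_trailhead t g → Pre_score_trailhead t g → Spec_score_trailhead t g (score_trailhead t g)

-- ===== LEMMAS AND PROOFS =====

-- the key list of g, and the measure: number of distinct grid keys not yet visited
def pvKeys (g : List (Int × Int × Int)) : List (Int × Int) := g.map (fun e => (e.1, e.2.1))

def pvMeas (g : List (Int × Int × Int)) (v : List (Int × Int)) : Nat :=
  ((pvKeys g).dedup.filter (fun k => decide (k ∉ v))).length

-- the step relation of the flood fill, and reachability
def pvStep (g : List (Int × Int × Int)) (p a : Int × Int) : Prop :=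
  (∃ d ∈ pvDeltas, a = (d.1 + p.1, d.2 + p.2)) ∧ pvKeyMem g a = true ∧ pvGet g a - pvGet g p = 1

def pvReach (g : List (Int × Int × Int)) (t a : Int × Int) : Prop :=
  Relation.ReflTransGen (pvStep g) t a

-- count of height-9 cells in a list
def pvC9 (g : List (Int × Int × Int)) (l : List (Int × Int)) : Nat :=
  l.countP (fun p => pvGet g p == 9)

lemma pvKeyMem_iff (g : List (Int × Int × Int)) (p : Int × Int) :
    pvKeyMem g p = true ↔ p ∈ pvKeys g := by
  simp only [pvKeyMem, List.any_eq_true, pvKeys, List.mem_map, Bool.and_eq_true, beq_iff_eq]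
  constructor
  · rintro ⟨e, he, h1, h2⟩; exact ⟨e, he, by simp [h1, h2]⟩
  · rintro ⟨e, he, h⟩; exact ⟨e, he, by simp [← h]⟩

lemma mem_adjacent (g : List (Int × Int × Int)) (p a : Int × Int) :
    a ∈ adjacent_points p g ↔
      (∃ d ∈ pvDeltas, a = (d.1 + p.1, d.2 + p.2)) ∧ pvKeyMem g a = true := by
  simp only [adjacent_points, List.mem_filterMap]
  constructor
  · rintro ⟨d, hd, h⟩
    by_cases hk : pvKeyMem g (d.1 + p.1, d.2 + p.2)
    · simp only [hk, if_pos] at h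
      cases h; exact ⟨⟨d, hd, rfl⟩, hk⟩
    · simp [hk] at h
  · rintro ⟨⟨d, hd, rfl⟩, hk⟩
    exact ⟨d, hd, by simp [hk]⟩

lemma pvStep_iff (g : List (Int × Int × Int)) (p a : Int × Int) :
    pvStep g p a ↔ a ∈ adjacent_points p g ∧ pvGet g a - pvGet g p = 1 := by
  rw [mem_adjacent]; unfold pvStep; tauto

-- measure facts
lemma pvMeas_lt (g : List (Int × Int × Int)) (v : List (Int × Int)) (p : Int × Int)
    (hk : pvKeyMem g p = true) (hnv : p ∉ v) :
    pvMeas g (v ++ [p]) < pvMeas g v := by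
  have hsub : ((pvKeys g).dedup.filter (fun k => decide (k ∉ v ++ [p]))).Sublist
      ((pvKeys g).dedup.filter (fun k => decide (k ∉ v))) := by
    apply List.monotone_filter_right
    intro a ha
    simp only [decide_eq_true_eq, List.mem_append] at *
    tauto
  have hp : p ∈ (pvKeys g).dedup.filter (fun k => decide (k ∉ v)) := by
    simp [List.mem_filter, List.mem_dedup, (pvKeyMem_iff g p).mp hk, hnv]
  have hnp : p ∉ (pvKeys g).dedup.filter (fun k => decide (k ∉ v ++ [p])) := by
    simp [List.mem_filter]
  have hle := hsub.length_le
  rcases Nat.lt_or_ge ((pvKeys g).dedup.filter (fun k => decide (k ∉ v ++ [p]))).length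
      ((pvKeys g).dedup.filter (fun k => decide (k ∉ v))).length with h | h
  · exact h
  · exfalso
    have := hsub.eq_of_length (Nat.le_antisymm hle h)
    rw [this] at hnp; exact hnp hp

lemma pvMeas_le (g : List (Int × Int × Int)) (v w : List (Int × Int)) :
    pvMeas g (v ++ w) ≤ pvMeas g v := by
  apply List.Sublist.length_le
  apply List.monotone_filter_right
  intro a ha
  simp only [decide_eq_true_eq, List.mem_append] at *
  tauto

lemma pvMeas_nil_lt (g : List (Int × Int × Int)) : pvMeas g [] < g.length + 1 := by
  have h1 : ((pvKeys g).dedup.filter (fun k => decide ((k : Int × Int) ∉ ([] : List (Int × Int))))).length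
      ≤ (pvKeys g).dedup.length := List.length_filter_le _ _
  have h2 : (pvKeys g).dedup.length ≤ (pvKeys g).length := (List.dedup_sublist _).length_le
  have h3 : (pvKeys g).length = g.length := List.length_map ..
  unfold pvMeas; omega

-- generic fold lemmas for "add a to the set if q a" loops
lemma mem_foldl_add_if (q : (Int × Int) → Prop) [DecidablePred q] :
    ∀ (l : List (Int × Int)) (s : List (Int × Int)) (x : Int × Int),
      x ∈ l.foldl (fun tv a => if q a then PySem.Set.add tv a else tv) s ↔
        x ∈ s ∨ (x ∈ l ∧ q x) := by
  intro l
  induction l with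
  | nil => simp
  | cons a l ih =>
    intro s x
    simp only [List.foldl_cons]
    by_cases hq : q a
    · rw [if_pos hq, ih, PySem.Set.mem_add]
      simp only [List.mem_cons]
      constructor
      · rintro ((h | h) | ⟨h, h2⟩)
        · exact Or.inl h
        · exact Or.inr ⟨Or.inl h, by rwa [h]⟩
        · exact Or.inr ⟨Or.inr h, h2⟩
      · rintro (h | ⟨h | h, h2⟩)
        · exact Or.inl (Or.inl h)
        · exact Or.inl (Or.inr h)
        · exact Or.inr ⟨h, h2⟩
    · rw [if_neg hq, ih]
      simp only [List.mem_cons]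
      constructor
      · rintro (h | ⟨h, h2⟩)
        · exact Or.inl h
        · exact Or.inr ⟨Or.inr h, h2⟩
      · rintro (h | ⟨h | h, h2⟩)
        · exact Or.inl h
        · exact absurd (h ▸ h2) hq
        · exact Or.inr ⟨h, h2⟩

lemma nodup_foldl_add_if (q : (Int × Int) → Prop) [DecidablePred q] :
    ∀ (l : List (Int × Int)) (s : List (Int × Int)), s.Nodup →
      (l.foldl (fun tv a => if q a then PySem.Set.add tv a else tv) s).Nodup := by
  intro l
  induction l with
  | nil => intro s hs; simpa
  | cons a l ih =>
    intro s hs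
    simp only [List.foldl_cons]
    by_cases hq : q a
    · rw [if_pos hq]; exact ih _ (PySem.Set.nodup_add _ _ hs)
    · rw [if_neg hq]; exact ih _ hs

-- rewrite A's inner loop body into the single-condition form
lemma aFold_eq (g : List (Int × Int × Int)) (visited' : List (Int × Int)) (elevation : Int)
    (l rest : List (Int × Int)) :
    l.foldl (fun tv a =>
        if PySem.Set.contains visited' a then tv
        else if pvGet g a - elevation ≠ 1 then tv
        else PySem.Set.add tv a) rest =
    l.foldl (fun tv a =>
        if a ∉ visited' ∧ pvGet g a - elevation = 1 then PySem.Set.add tv a else tv) rest := by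
  congr 1
  funext tv a
  by_cases h1 : a ∈ visited'
  · rw [if_pos ((PySem.Set.contains_iff _ _).mpr h1), if_neg (by tauto)]
  · rw [if_neg (by rw [PySem.Set.contains_iff]; exact h1)]
    by_cases h2 : pvGet g a - elevation = 1
    · rw [if_neg (by omega), if_pos ⟨h1, h2⟩]
    · rw [if_pos (by omega), if_neg (by tauto)]

lemma pvC9_append9 (g : List (Int × Int × Int)) (V : List (Int × Int)) (p : Int × Int) :
    (pvC9 g (V ++ [p]) : Int) = if pvGet g p = 9 then (pvC9 g V : Int) + 1 else (pvC9 g V : Int) := by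
  unfold pvC9
  rw [List.countP_append]
  by_cases h : pvGet g p = 9 <;> simp [h]

-- ===== the A-side loop invariant =====
lemma aLoop_correct (g : List (Int × Int × Int)) (t : Int × Int) :
    ∀ (fuel : Nat) (V W : List (Int × Int)) (r : Int),
      V.Nodup → W.Nodup → (∀ x ∈ W, x ∉ V) →
      (∀ x ∈ V, pvReach g t x) → (∀ x ∈ W, pvReach g t x) →
      (∀ x ∈ V, ∀ a, pvStep g x a → a ∈ V ∨ a ∈ W) →
      (t ∈ V ∨ t ∈ W) →
      (∀ x ∈ W, pvKeyMem g x = true) →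
      r = (pvC9 g V : Int) →
      pvMeas g V < fuel →
      ∃ Vf : List (Int × Int), aLoop g fuel V W r = (pvC9 g Vf : Int) ∧ Vf.Nodup ∧
        (∀ x, x ∈ Vf ↔ pvReach g t x) := by
  intro fuel
  induction fuel with
  | zero => intro V W r _ _ _ _ _ _ _ _ _ hlt; exact absurd hlt (Nat.not_lt_zero _)
  | succ fuel ih =>
    intro V W r hVnd hWnd hdisj hVr hWr hcl ht hWk hr hlt
    match W with
    | [] =>
      refine ⟨V, by simp only [aLoop]; exact hr, hVnd, fun x => ⟨hVr x, ?_⟩⟩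
      intro hx
      induction hx with
      | refl => rcases ht with h | h; exact h; simp at h
      | tail _ hstep ih2 => rcases hcl _ ih2 _ hstep with h | h; exact h; simp at h
    | p :: rest =>
      have hpW : p ∈ p :: rest := List.mem_cons_self ..
      have hpV : p ∉ V := hdisj p hpW
      have hpk : pvKeyMem g p = true := hWk p hpW
      have hpr : pvReach g t p := hWr p hpW
      have hadd : PySem.Set.add V p = V ++ [p] := PySem.Set.add_of_not_mem hpV
      have hmemV' : ∀ x, x ∈ PySem.Set.add V p ↔ x ∈ V ∨ x = p := by
        intro x; rw [hadd]; simp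
      have hmemW' : ∀ x, x ∈ (adjacent_points p g).foldl
          (fun tv a => if a ∉ PySem.Set.add V p ∧ pvGet g a - pvGet g p = 1
            then PySem.Set.add tv a else tv) rest ↔
          x ∈ rest ∨ (x ∈ adjacent_points p g ∧
            (x ∉ PySem.Set.add V p ∧ pvGet g x - pvGet g p = 1)) :=
        fun x => mem_foldl_add_if _ _ _ _
      simp only [aLoop, aFold_eq]
      refine ih _ _ _ ?_ ?_ ?_ ?_ ?_ ?_ ?_ ?_ ?_ ?_
      · exact PySem.Set.nodup_add _ _ hVnd
      · exact nodup_foldl_add_if _ _ _ (List.Nodup.of_cons hWnd)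
      · intro x hx
        rcases (hmemW' x).mp hx with h | ⟨_, hqx, _⟩
        · rw [hmemV']
          rintro (hv | rfl)
          · exact hdisj x (List.mem_cons_of_mem _ h) hv
          · exact (List.nodup_cons.mp hWnd).1 h
        · exact hqx
      · intro x hx
        rcases (hmemV' x).mp hx with h | rfl
        · exact hVr x h
        · exact hpr
      · intro x hx
        rcases (hmemW' x).mp hx with h | ⟨hadj, _, hd⟩
        · exact hWr x (List.mem_cons_of_mem _ h)
        · exact hpr.tail ((pvStep_iff g p x).mpr ⟨hadj, hd⟩)
      · intro x hx a hstep
        rcases (hmemV' x).mp hx with h | rfl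
        · rcases hcl x h a hstep with h2 | h2
          · exact Or.inl ((hmemV' a).mpr (Or.inl h2))
          · rcases List.mem_cons.mp h2 with rfl | h3
            · exact Or.inl ((hmemV' a).mpr (Or.inr rfl))
            · exact Or.inr ((hmemW' a).mpr (Or.inl h3))
        · by_cases hv : a ∈ PySem.Set.add V x
          · exact Or.inl hv
          · exact Or.inr ((hmemW' a).mpr (Or.inr ⟨((pvStep_iff g x a).mp hstep).1,
              hv, ((pvStep_iff g x a).mp hstep).2⟩))
      · rcases ht with h | h
        · exact Or.inl ((hmemV' t).mpr (Or.inl h))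
        · rcases List.mem_cons.mp h with rfl | h2
          · exact Or.inl ((hmemV' t).mpr (Or.inr rfl))
          · exact Or.inr ((hmemW' t).mpr (Or.inl h2))
      · intro x hx
        rcases (hmemW' x).mp hx with h | ⟨hadj, _⟩
        · exact hWk x (List.mem_cons_of_mem _ h)
        · exact ((mem_adjacent g p x).mp hadj).2
      · rw [hadd, pvC9_append9, hr]
      · rw [hadd]
        have := pvMeas_lt g V p hpk hpV
        omega

-- ===== the B-side DFS invariant =====
lemma dfsB_correct (g : List (Int × Int × Int)) :
    ∀ (fuel : Nat) (p : Int × Int) (v : List (Int × Int)),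
      v.Nodup → pvKeyMem g p = true → pvMeas g v < fuel →
      ∃ w : List (Int × Int), dfsB g fuel p v = ((pvC9 g w : Int), v ++ w) ∧
        (v ++ w).Nodup ∧
        (∀ x ∈ w, Relation.ReflTransGen (pvStep g) p x) ∧
        p ∈ v ++ w ∧
        (∀ x ∈ w, ∀ a, pvStep g x a → a ∈ v ++ w) := by
  intro fuel
  induction fuel with
  | zero => intro p v _ _ hlt; exact absurd hlt (Nat.not_lt_zero _)
  | succ fuel ih =>
    intro p v hvnd hpk hlt
    by_cases hpv : p ∈ v
    · refine ⟨[], ?_, by simpa, by simp, by simpa, by simp⟩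
      simp only [dfsB, (PySem.Set.contains_iff v p).mpr hpv, if_pos]
      simp [pvC9]
    · have hadd : PySem.Set.add v p = v ++ [p] := PySem.Set.add_of_not_mem hpv
      have hmeas1 : pvMeas g (v ++ [p]) < fuel := by
        have := pvMeas_lt g v p hpk hpv
        omega
      -- the inner fold over a sublist of the deltas
      have inner : ∀ (ds : List (Int × Int)), ds.Sublist pvDeltas →
          ∀ (c0 : Int) (v0 : List (Int × Int)), v0.Nodup → pvMeas g v0 < fuel →
          ∃ w : List (Int × Int),
            ds.foldl (fun acc d =>
              let a := (d.1 + p.1, d.2 + p.2)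
              if pvKeyMem g a = true ∧ pvGet g a - pvGet g p = 1 then
                let r := dfsB g fuel a acc.2
                (acc.1 + r.1, r.2)
              else acc) (c0, v0) = (c0 + (pvC9 g w : Int), v0 ++ w) ∧
            (v0 ++ w).Nodup ∧
            (∀ x ∈ w, ∃ d ∈ ds, (pvKeyMem g (d.1 + p.1, d.2 + p.2) = true ∧
                pvGet g (d.1 + p.1, d.2 + p.2) - pvGet g p = 1) ∧
              Relation.ReflTransGen (pvStep g) (d.1 + p.1, d.2 + p.2) x) ∧
            (∀ d ∈ ds, (pvKeyMem g (d.1 + p.1, d.2 + p.2) = true ∧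
                pvGet g (d.1 + p.1, d.2 + p.2) - pvGet g p = 1) →
              (d.1 + p.1, d.2 + p.2) ∈ v0 ++ w) ∧
            (∀ x ∈ w, ∀ a, pvStep g x a → a ∈ v0 ++ w) := by
        intro ds
        induction ds with
        | nil => intro _ c0 v0 hnd _; exact ⟨[], by simp [pvC9], by simpa, by simp, by simp, by simp⟩
        | cons d ds' ihd =>
          intro hds c0 v0 hnd hm
          have hds' : ds'.Sublist pvDeltas := (List.sublist_cons_self d ds').trans hds
          simp only [List.foldl_cons]
          by_cases hc : pvKeyMem g (d.1 + p.1, d.2 + p.2) = true ∧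
              pvGet g (d.1 + p.1, d.2 + p.2) - pvGet g p = 1
          · rw [if_pos hc]
            obtain ⟨w1, heq1, hnd1, hr1, hin1, hcl1⟩ := ih (d.1 + p.1, d.2 + p.2) v0 hnd hc.1 hm
            rw [heq1]
            have hm2 : pvMeas g (v0 ++ w1) < fuel := lt_of_le_of_lt (pvMeas_le g v0 w1) hm
            obtain ⟨w2, heq2, hnd2, hr2, hin2, hcl2⟩ := ihd hds' (c0 + (pvC9 g w1 : Int))
              (v0 ++ w1) hnd1 hm2
            refine ⟨w1 ++ w2, ?_, ?_, ?_, ?_, ?_⟩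
            · rw [heq2, Prod.mk.injEq]
              constructor
              · unfold pvC9; rw [List.countP_append]; push_cast; ring
              · rw [List.append_assoc]
            · rw [← List.append_assoc]; exact hnd2
            · intro x hx
              rcases List.mem_append.mp hx with h | h
              · exact ⟨d, List.mem_cons_self .., hc, hr1 x h⟩
              · obtain ⟨d', hd', hc', hrt⟩ := hr2 x h
                exact ⟨d', List.mem_cons_of_mem _ hd', hc', hrt⟩
            · intro d0 hd0 hc0
              rw [← List.append_assoc]
              rcases List.mem_cons.mp hd0 with rfl | hd0'
              · exact List.mem_append.mpr (Or.inl hin1)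
              · exact hin2 d0 hd0' hc0
            · intro x hx a hstep
              rw [← List.append_assoc]
              rcases List.mem_append.mp hx with h | h
              · rcases List.mem_append.mp (hcl1 x h a hstep) with h2 | h2
                · exact List.mem_append.mpr (Or.inl (List.mem_append.mpr (Or.inl h2)))
                · exact List.mem_append.mpr (Or.inl (List.mem_append.mpr (Or.inr h2)))
              · exact hcl2 x h a hstep
          · rw [if_neg hc]
            obtain ⟨w, heq, hnd', hr, hin, hcl⟩ := ihd hds' c0 v0 hnd hm
            refine ⟨w, heq, hnd', ?_, ?_, hcl⟩
            · intro x hx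
              obtain ⟨d', hd', hc', hrt⟩ := hr x hx
              exact ⟨d', List.mem_cons_of_mem _ hd', hc', hrt⟩
            · intro d0 hd0 hc0
              rcases List.mem_cons.mp hd0 with rfl | hd0'
              · exact absurd hc0 hc
              · exact hin d0 hd0' hc0
      have hcontains : PySem.Set.contains v p = false := by
        rw [← Bool.not_eq_true, PySem.Set.contains_iff]; exact hpv
      obtain ⟨w', heq, hnd', hr, hin, hcl⟩ := inner pvDeltas (List.Sublist.refl _)
        (if pvGet g p = 9 then 1 else 0) (v ++ [p])
        (hadd ▸ PySem.Set.nodup_add v p hvnd) hmeas1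
      refine ⟨p :: w', ?_, ?_, ?_, ?_, ?_⟩
      · simp only [dfsB, hcontains, Bool.false_eq_true, if_false, hadd]
        rw [heq, Prod.mk.injEq]
        constructor
        · unfold pvC9
          rw [List.countP_cons]
          by_cases h9 : pvGet g p = 9
          · simp [h9]; omega
          · simp [h9]
        · rw [List.append_assoc]; rfl
      · rw [← List.singleton_append, ← List.append_assoc]; exact hnd'
      · intro x hx
        rcases List.mem_cons.mp hx with rfl | hx'
        · exact Relation.ReflTransGen.refl
        · obtain ⟨d, hd, hc, hrt⟩ := hr x hx'
          exact Relation.ReflTransGen.head ⟨⟨d, hd, rfl⟩, hc.1, hc.2⟩ hrt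
      · simp
      · intro x hx a hstep
        rw [← List.singleton_append, ← List.append_assoc]
        rcases List.mem_cons.mp hx with rfl | hx'
        · obtain ⟨⟨d, hd, rfl⟩, hk, hdv⟩ := hstep
          exact hin d hd ⟨hk, hdv⟩
        · exact hcl x hx' a hstep

-- ===== VERDICT (by name: the statement is the Claim_ definition above) =====
theorem score_trailhead_spec : Claim_equal_score_trailhead := by
  intro t g _ hpre
  unfold Spec_score_trailhead score_trailhead score_trailhead_alt
  obtain ⟨Vf, hA, hVfnd, hVfmem⟩ := aLoop_correct g t (g.length + 1) [] [t] 0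
    (by simp) (by simp) (by simp) (by simp)
    (fun x hx => by rw [List.mem_singleton] at hx; exact hx ▸ Relation.ReflTransGen.refl)
    (by simp) (by simp)
    (fun x hx => by rw [List.mem_singleton] at hx; exact hx ▸ hpre)
    (by simp [pvC9]) (pvMeas_nil_lt g)
  obtain ⟨w, hB, hwnd, hwr, htw, hwcl⟩ := dfsB_correct g (g.length + 1) t []
    (by simp) hpre (pvMeas_nil_lt g)
  show aLoop g (g.length + 1) [] [t] 0 = (dfsB g (g.length + 1) t []).1
  rw [hA, hB]
  simp only [List.nil_append] at hwnd htw hwcl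
  have hwmem : ∀ x, x ∈ w ↔ pvReach g t x := by
    intro x
    refine ⟨hwr x, ?_⟩
    intro hx
    induction hx with
    | refl => exact htw
    | tail _ hstep ih2 => exact hwcl _ ih2 _ hstep
  have hperm : Vf.Perm w := by
    rw [List.perm_ext_iff_of_nodup hVfnd hwnd]
    intro x; rw [hVfmem, hwmem]
  have : pvC9 g Vf = pvC9 g w := hperm.countP_eq _
  simp [this]
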